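-- pv_equiv track=rewrite | github.com/davidunga/ml-2024 | hyperparam_tuning.py | yield_from_grid
-- ===== SOURCE A (Python) =====
-- from copy import deepcopy
-- from typing import Dict, List, Tuple
-- from itertools import product
--
-- def yield_from_grid(grid_dict: Dict, default_dict: Dict = None):
--     default_dict = deepcopy(default_dict) if default_dict else {}
--     keys = grid_dict.keys()
--     if default_dict:
--         assert set(keys).issubset(default_dict.keys())
--     for vals in product(*grid_dict.values()):
--         result = default_dict
--         result.update(dict(zip(keys, vals)))
--         yield result
-- ===== SOURCE B (Python) =====
-- from copy import deepcopy
--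
-- # Recursive depth-first generator over the grid items (no itertools.product).
-- # Like the original, every yield hands out the SAME mutated dict object, so the
-- # materialized sequence is identical to A's; equivalence is about yielded values.
-- def yield_from_grid(grid_dict, default_dict=None):
--     default_dict = deepcopy(default_dict) if default_dict else {}
--     if default_dict:
--         assert set(grid_dict.keys()).issubset(default_dict.keys())
--
--     def walk(items, chosen):
--         if not items:
--             result = default_dict          # same shared object, as in the original
--             result.update(chosen)
--             yield result
--         else:
--             (key, values), rest = items[0], items[1:]
--             for v in values:
--                 chosen[key] = v
--                 yield from walk(rest, chosen)
--
--     yield from walk(list(grid_dict.items()), {})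
-- ===== Notes on version B (the rewrite author's own statement) =====
-- stated objective: alternative
-- what changed: Replaces the itertools.product-driven loop with a hand-rolled recursive depth-first generator that walks the grid items carrying the chosen values in a dict; like A it yields the same mutated default-dict object each time.
import Mathlib
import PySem

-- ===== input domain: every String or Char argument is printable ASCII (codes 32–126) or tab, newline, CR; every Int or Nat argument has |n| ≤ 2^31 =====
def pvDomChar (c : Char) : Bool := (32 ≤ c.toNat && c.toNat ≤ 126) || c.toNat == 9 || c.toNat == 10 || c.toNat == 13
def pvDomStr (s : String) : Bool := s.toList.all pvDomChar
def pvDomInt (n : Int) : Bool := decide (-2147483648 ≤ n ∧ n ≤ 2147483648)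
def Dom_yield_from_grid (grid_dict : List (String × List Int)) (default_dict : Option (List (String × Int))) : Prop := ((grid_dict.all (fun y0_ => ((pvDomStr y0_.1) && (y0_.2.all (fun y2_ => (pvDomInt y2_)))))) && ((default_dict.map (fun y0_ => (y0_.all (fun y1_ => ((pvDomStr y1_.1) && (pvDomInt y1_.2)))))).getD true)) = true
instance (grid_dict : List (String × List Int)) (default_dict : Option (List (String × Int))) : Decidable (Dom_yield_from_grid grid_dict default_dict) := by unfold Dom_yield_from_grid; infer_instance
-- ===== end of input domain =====

-- B replaces itertools.product with a recursive depth-first generator over the grid items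
-- (objective: alternative decomposition, same cost).  Both generators yield the SAME mutated
-- dict object each time (as A does); the equivalence proved here is about the materialized
-- sequence of yielded values.

-- ===== PORT A =====
-- hand port of itertools.product(*lists) (leftmost factor varies slowest, exact order)
def pyProduct : List (List Int) → List (List Int)
  | [] => [[]]
  | vs :: rest => vs.flatMap (fun v => (pyProduct rest).map (fun t => v :: t))

def yield_from_grid (grid_dict : List (String × List Int)) (default_dict : Option (List (String × Int))) : List (List (String × Int)) :=
  -- default_dict = deepcopy(default_dict) if default_dict else {}
  let dd : PySem.Dict String Int :=
    match default_dict with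
    | some d => if d.isEmpty then PySem.Dict.empty else PySem.Dict.mk d
    | none => PySem.Dict.empty
  -- keys = grid_dict.keys()  (the assert is handled by Pre_yield_from_grid)
  let keys := (PySem.Dict.mk grid_dict).keys
  let combos := pyProduct (PySem.Dict.mk grid_dict).values
  -- the loop mutates the single dict `result = default_dict` and yields it; every yielded
  -- element aliases that one object, so the materialized list repeats its final state
  let final := combos.foldl (fun res vals => PySem.Dict.update res (keys.zip vals)) dd
  combos.map (fun _ => final.items)

-- ===== PORT B =====
-- walk(items, chosen) of Source B: the shared (mutated) dict is threaded through; each leaf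
-- updates it and yields an alias to it, so the port returns (final shared dict, #yields)
def walkB : List (String × List Int) → PySem.Dict String Int → PySem.Dict String Int → PySem.Dict String Int × Nat
  | [], chosen, shared => (PySem.Dict.update shared chosen.items, 1)
  | (k, vs) :: rest, chosen, shared =>
      vs.foldl (fun st v =>
          let r := walkB rest (chosen.insert k v) st.1
          (r.1, st.2 + r.2))
        (shared, 0)

def yield_from_grid_alt (grid_dict : List (String × List Int)) (default_dict : Option (List (String × Int))) : List (List (String × Int)) :=
  let base : PySem.Dict String Int :=
    match default_dict with
    | some d => if d.isEmpty then PySem.Dict.empty else PySem.Dict.mk d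
    | none => PySem.Dict.empty
  let r := walkB grid_dict PySem.Dict.empty base
  List.replicate r.2 r.1.items

-- ===== PRECONDITION & SPEC =====
-- Pre_ excludes (a) grid/default association lists with duplicate keys, which do not represent
-- any Python dict, and (b) inputs where the grid keys are not a subset of a non-empty
-- default_dict's keys, on which A (and B) raise AssertionError.
def Pre_yield_from_grid (grid_dict : List (String × List Int)) (default_dict : Option (List (String × Int))) : Prop :=
  (grid_dict.map Prod.fst).Nodup ∧
  ((default_dict.getD []).map Prod.fst).Nodup ∧
  (default_dict.getD [] ≠ [] → ∀ k ∈ grid_dict.map Prod.fst, k ∈ (default_dict.getD []).map Prod.fst)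
instance (grid_dict : List (String × List Int)) (default_dict : Option (List (String × Int))) : Decidable (Pre_yield_from_grid grid_dict default_dict) := by unfold Pre_yield_from_grid; infer_instance

def pvWitness_yield_from_grid : (List (String × List Int)) × (Option (List (String × Int))) :=
  ([("a", [1, 2]), ("b", [3])], some [("a", 0), ("b", 0), ("c", 9)])

def Spec_yield_from_grid (grid_dict : List (String × List Int)) (default_dict : Option (List (String × Int))) (out : List (List (String × Int))) : Prop := out = yield_from_grid_alt grid_dict default_dict
instance (grid_dict : List (String × List Int)) (default_dict : Option (List (String × Int))) (out : List (List (String × Int))) : Decidable (Spec_yield_from_grid grid_dict default_dict out) := by unfold Spec_yield_from_grid; infer_instance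

-- ===== CLAIM (what is proved, stated in full; the proofs are below) =====
def Claim_equal_yield_from_grid : Prop := ∀ (grid_dict : List (String × List Int)) (default_dict : Option (List (String × Int))), Dom_yield_from_grid grid_dict default_dict → Pre_yield_from_grid grid_dict default_dict → Spec_yield_from_grid grid_dict default_dict (yield_from_grid grid_dict default_dict)

-- ===== LEMMAS AND PROOFS =====

-- a fold that pairs an accumulator with a running count splits into the two components
theorem foldl_pair_split {α β : Type} (f : α → β → α) (g : β → Nat) (l : List β) (d : α) (n : Nat) :
    l.foldl (fun st v => (f st.1 v, st.2 + g v)) (d, n) = (l.foldl f d, n + (l.map g).sum) := by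
  induction l generalizing d n with
  | nil => simp
  | cons x xs ih => simp [List.foldl_cons, ih, Nat.add_assoc]

-- the DFS walk of B equals a fold over the product of the remaining value lists
theorem walkB_eq (items : List (String × List Int)) :
    ∀ (chosen shared : PySem.Dict String Int),
      (items.map Prod.fst).Nodup →
      (∀ k ∈ items.map Prod.fst, k ∉ chosen.keys) →
      walkB items chosen shared =
        ((pyProduct (items.map Prod.snd)).foldl
           (fun d vals => PySem.Dict.update d (chosen.items ++ (items.map Prod.fst).zip vals)) shared,
         (pyProduct (items.map Prod.snd)).length) := by
  induction items with
  | nil => intro chosen shared _ _; simp [walkB, pyProduct]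
  | cons p rest ih =>
    obtain ⟨k, vs⟩ := p
    intro chosen shared hnd hdisj
    have hk : k ∉ chosen.keys := hdisj k (by simp)
    have hkc : chosen.contains k = false := by
      simp [PySem.Dict.contains_eq_decide_mem_keys, hk]
    have hstep : ∀ (v : Int) (s : PySem.Dict String Int),
        walkB rest (chosen.insert k v) s =
          ((pyProduct (rest.map Prod.snd)).foldl
             (fun d vals => PySem.Dict.update d
               ((chosen.items ++ [(k, v)]) ++ (rest.map Prod.fst).zip vals)) s,
           (pyProduct (rest.map Prod.snd)).length) := by
      intro v s
      have h1 : (rest.map Prod.fst).Nodup := by simpa using hnd.of_cons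
      have h2 : ∀ k' ∈ rest.map Prod.fst, k' ∉ (chosen.insert k v).keys := by
        intro k' hk'
        have hne : k' ≠ k := by
          intro h; subst h
          exact (List.nodup_cons.mp (by simpa using hnd)).1 hk'
        rw [PySem.Dict.keys_insert_of_not_contains chosen v hkc]
        simp [hne, hdisj k' (by simp [hk'])]
      rw [ih (chosen.insert k v) s h1 h2,
          PySem.Dict.items_insert_of_not_contains chosen v hkc]
    show vs.foldl (fun st v =>
          let r := walkB rest (chosen.insert k v) st.1
          (r.1, st.2 + r.2)) (shared, 0) = _
    simp only [hstep]
    rw [foldl_pair_split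
          (fun s v => (pyProduct (rest.map Prod.snd)).foldl
            (fun d vals => PySem.Dict.update d
              ((chosen.items ++ [(k, v)]) ++ (rest.map Prod.fst).zip vals)) s)
          (fun _ => (pyProduct (rest.map Prod.snd)).length) vs shared 0]
    simp only [pyProduct, List.map_cons, List.foldl_flatMap, List.length_flatMap,
      List.foldl_map, List.length_map, List.map_const', List.sum_replicate, smul_eq_mul]
    simp only [Prod.mk.injEq, Nat.zero_add, and_true]
    apply List.foldl_ext
    intro s v _
    apply List.foldl_ext
    intro d t _
    simp

-- ===== VERDICT (by name: the statement is the Claim_ definition above) =====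
theorem yield_from_grid_spec : Claim_equal_yield_from_grid := by
  intro gd dd _ hpre
  simp only [Spec_yield_from_grid, yield_from_grid, yield_from_grid_alt]
  rw [walkB_eq gd PySem.Dict.empty _ hpre.1 (by simp [PySem.Dict.keys_empty])]
  simp only [List.map_const', PySem.Dict.keys, PySem.Dict.values]
  congr 1
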